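-- pv_equiv track=rewrite | github.com/JeissonS02/ClasicoCuantico | Simulacion.py | matrix_valida
-- ===== SOURCE A (Python) =====
-- def matrix_valida(matriz):
--     num_filas, num_columnas = len(matriz), len(matriz[0])
--     resultants = []
--
--     for column in range(num_columnas):
--         x = False
--         for fila in range(num_filas):
--             if matriz[fila][column] == 1:
--                 x = True
--                 break
--         resultants.append(x)
--
--     if False in resultants:
--         return False
--     else:
--         return True
-- ===== SOURCE B (Python) =====
-- def matrix_valida(matriz):
--     num_columnas = len(matriz[0])
--     cubiertas = set()
--     for fila in matriz:
--         for j, v in enumerate(fila):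
--             if v == 1:
--                 cubiertas.add(j)
--     return all(c in cubiertas for c in range(num_columnas))
-- ===== Notes on version B (the rewrite author's own statement) =====
-- stated objective: alternative
-- what changed: Replaces the column-major nested scan with per-column break and a boolean result list by a single row-major pass that collects covered column indices in a set, then checks that every column index is covered.
-- outside the precondition, e.g. on matrix_valida([[0], []]): A raises IndexError, B returns False
import Mathlib
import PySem

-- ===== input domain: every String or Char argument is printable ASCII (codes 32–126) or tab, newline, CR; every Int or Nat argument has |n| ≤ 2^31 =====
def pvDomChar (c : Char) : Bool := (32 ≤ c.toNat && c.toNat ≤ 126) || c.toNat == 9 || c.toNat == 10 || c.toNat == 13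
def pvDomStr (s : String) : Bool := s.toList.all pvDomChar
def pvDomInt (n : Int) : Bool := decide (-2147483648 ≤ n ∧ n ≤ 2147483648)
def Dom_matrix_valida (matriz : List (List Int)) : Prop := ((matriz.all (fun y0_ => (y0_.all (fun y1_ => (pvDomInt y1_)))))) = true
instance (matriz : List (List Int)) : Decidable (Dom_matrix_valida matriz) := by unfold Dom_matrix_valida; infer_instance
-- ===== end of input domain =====

-- B replaces A's column-major nested scan (boolean per column, then `False in`)
-- by one row-major pass collecting covered column indices in a set; same cost, alternative structure.
-- ===== PORT A =====
def matrix_valida (matriz : List (List Int)) : Bool :=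
  let numFilas := matriz.length
  let numColumnas := (matriz.headD []).length
  -- inner 'for fila … : if == 1: x = True; break' is exactly: some row index hits 1 in this column
  let resultants := (List.range numColumnas).foldl
    (fun acc column =>
      acc ++ [(List.range numFilas).any (fun fila => ((matriz.getD fila []).getD column 0) == 1)]) []
  if resultants.contains false then false else true

-- ===== PORT B =====
def matrix_valida_alt (matriz : List (List Int)) : Bool :=
  let numColumnas := (matriz.headD []).length
  let cubiertas : PySem.Set Int := matriz.foldl
    (fun s fila =>
      (PySem.List.enumerate fila 0).foldl
        (fun s jv => if jv.2 == 1 then PySem.Set.add s jv.1 else s) s)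
    PySem.Set.empty
  (PySem.List.pyRange 0 (numColumnas : Int) 1).all (fun c => PySem.Set.contains cubiertas c)

-- ===== PRECONDITION & SPEC =====
-- Pre_ excludes the empty matrix (matriz[0] raises IndexError) and matrices with a row
-- shorter than row 0, on which A's inner indexing can raise IndexError; on some such ragged
-- inputs A still returns by breaking early, an accident of its column-major scan order.
def Pre_matrix_valida (matriz : List (List Int)) : Prop :=
  matriz ≠ [] ∧ ∀ fila ∈ matriz, (matriz.headD []).length ≤ fila.length
instance (matriz : List (List Int)) : Decidable (Pre_matrix_valida matriz) := by
  unfold Pre_matrix_valida; infer_instance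
def pvWitness_matrix_valida : List (List Int) := [[0, 1], [1, 0]]
def Spec_matrix_valida (matriz : List (List Int)) (out : Bool) : Prop := out = matrix_valida_alt matriz
instance (matriz : List (List Int)) (out : Bool) : Decidable (Spec_matrix_valida matriz out) := by unfold Spec_matrix_valida; infer_instance

-- ===== CLAIM (what is proved, stated in full; the proofs are below) =====
def Claim_equal_matrix_valida : Prop := ∀ (matriz : List (List Int)), Dom_matrix_valida matriz → Pre_matrix_valida matriz → Spec_matrix_valida matriz (matrix_valida matriz)

-- ===== LEMMAS AND PROOFS =====

-- membership in the set built from one row (inner loop of B)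
theorem mem_row_fold (fila : List Int) (k : Int) (s : PySem.Set Int) (x : Int) :
    x ∈ (PySem.List.enumerate fila k).foldl
        (fun s jv => if jv.2 == 1 then PySem.Set.add s jv.1 else s) s ↔
      x ∈ s ∨ ∃ i : Nat, i < fila.length ∧ fila.getD i 0 = 1 ∧ x = k + i := by
  induction fila generalizing k s with
  | nil => simp [PySem.List.enumerate_nil]
  | cons a t ih =>
    rw [PySem.List.enumerate_cons]
    simp only [List.foldl_cons, ih]
    have hsplit : x ∈ (if (a == 1) = true then PySem.Set.add s k else s) ↔
        x ∈ s ∨ (a = 1 ∧ x = k) := by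
      by_cases ha : a = 1 <;> simp [ha, PySem.Set.mem_add]
    rw [hsplit]
    constructor
    · rintro ((h | ⟨ha, rfl⟩) | ⟨i, hi, hv, rfl⟩)
      · exact Or.inl h
      · exact Or.inr ⟨0, by simp, by simpa using ha, by simp⟩
      · exact Or.inr ⟨i + 1, by simpa using Nat.succ_lt_succ hi, by simpa using hv,
          by push_cast; ring⟩
    · rintro (h | ⟨i, hi, hv, rfl⟩)
      · exact Or.inl (Or.inl h)
      · cases i with
        | zero => exact Or.inl (Or.inr ⟨by simpa using hv, by simp⟩)
        | succ j =>
          exact Or.inr ⟨j, by simpa using Nat.lt_of_succ_lt_succ (by simpa using hi),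
            by simpa using hv, by push_cast; ring⟩

-- membership in the full covered-columns set (outer loop of B)
theorem mem_cubiertas (rows : List (List Int)) (s : PySem.Set Int) (x : Int) :
    x ∈ rows.foldl
        (fun s fila =>
          (PySem.List.enumerate fila 0).foldl
            (fun s jv => if jv.2 == 1 then PySem.Set.add s jv.1 else s) s) s ↔
      x ∈ s ∨ ∃ fila ∈ rows, ∃ i : Nat, i < fila.length ∧ fila.getD i 0 = 1 ∧ x = (i : Int) := by
  induction rows generalizing s with
  | nil => simp
  | cons r t ih =>
    simp only [List.foldl_cons, ih, mem_row_fold]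
    constructor
    · rintro ((h | ⟨i, hi, hv, hx⟩) | ⟨fila, hf, i, hi, hv, hx⟩)
      · exact Or.inl h
      · exact Or.inr ⟨r, by simp, i, hi, hv, by simpa using hx⟩
      · exact Or.inr ⟨fila, by simp [hf], i, hi, hv, hx⟩
    · rintro (h | ⟨fila, hf, i, hi, hv, hx⟩)
      · exact Or.inl (Or.inl h)
      · rcases List.mem_cons.mp hf with rfl | hf
        · exact Or.inl (Or.inr ⟨i, hi, hv, by simpa using hx⟩)
        · exact Or.inr ⟨fila, hf, i, hi, hv, hx⟩

theorem pyRange_all (n : Nat) (g : Int → Bool) :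
    (PySem.List.pyRange 0 (n : Int) 1).all g = (List.range n).all (fun k => g k) := by
  rw [PySem.List.pyRange_one]; simp [Function.comp_def]

theorem contains_false_map (l : List Nat) (f : Nat → Bool) :
    ((l.map f).contains false) = !l.all f := by
  cases h : l.all f with
  | true => rw [List.all_eq_true] at h; simp; exact h
  | false => rw [List.all_eq_false] at h; simpa using h

theorem if_not_bool (b : Bool) : (if (!b) = true then false else true) = b := by
  cases b <;> rfl

theorem all_congr_mem (l : List Nat) (f g : Nat → Bool) (h : ∀ x ∈ l, f x = g x) :
    l.all f = l.all g := by
  induction l with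
  | nil => rfl
  | cons a t ih => simp_all [List.all_cons]

-- ===== VERDICT (by name: the statement is the Claim_ definition above) =====
theorem matrix_valida_spec : Claim_equal_matrix_valida := by
  intro matriz _hdom hpre
  obtain ⟨hne, hlen⟩ := hpre
  unfold Spec_matrix_valida matrix_valida matrix_valida_alt
  simp only [PySem.List.foldl_append_singleton_eq_map, List.nil_append]
  rw [contains_false_map, if_not_bool, pyRange_all]
  apply all_congr_mem
  intro c hc
  rw [List.mem_range] at hc
  rw [Bool.eq_iff_iff, PySem.Set.contains_iff, mem_cubiertas]
  simp only [List.any_eq_true, List.mem_range, beq_iff_eq, PySem.Set.empty,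
    List.not_mem_nil, false_or]
  constructor
  · rintro ⟨i, hi, hv⟩
    have hm : matriz.getD i [] ∈ matriz := by
      rw [List.getD_eq_getElem _ _ hi]; exact List.getElem_mem hi
    exact ⟨matriz.getD i [], hm, c, lt_of_lt_of_le hc (hlen _ hm), hv, rfl⟩
  · rintro ⟨fila, hf, j, hj, hv, hx⟩
    obtain rfl : c = j := by exact_mod_cast hx
    obtain ⟨i, hi, rfl⟩ := List.mem_iff_getElem.mp hf
    exact ⟨i, hi, by rwa [List.getD_eq_getElem _ _ hi]⟩
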